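-- pv_equiv track=rewrite | github.com/cruicky82/DO-178C-Agent | scripts/cluster_hlrs.py | _sub_cluster_by_imports
-- ===== SOURCE A (Python) =====
-- from collections import defaultdict
--
-- def _sub_cluster_by_imports(files, graph):
--     """
--     Sub-cluster files within a directory by mutual import relationships.
--
--     Uses a simple union-find approach: files that import each other
--     are placed in the same sub-cluster.
--     """
--     parent = {f: f for f in files}
--
--     def find(x):
--         while parent[x] != x:
--             parent[x] = parent[parent[x]]
--             x = parent[x]
--         return x
--
--     def union(a, b):
--         ra, rb = find(a), find(b)
--         if ra != rb:
--             parent[ra] = rb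
--
--     file_set = set(files)
--     for f in files:
--         for dep in graph.get(f, set()):
--             if dep in file_set:
--                 union(f, dep)
--
--     groups = defaultdict(list)
--     for f in files:
--         groups[find(f)].append(f)
--
--     return list(groups.values())
-- ===== SOURCE B (Python) =====
-- from collections import defaultdict
--
-- def _sub_cluster_by_imports(files, graph):
--     """
--     Label-propagation re-implementation: keep a direct file -> component-label
--     map and, for every mutual-import edge, rewrite every occurrence of one
--     label into the other; no parent forest, no find/union, no path compression.
--     """
--     label = {f: f for f in files}
--     file_set = set(files)
--     for f in files:
--         for dep in graph.get(f, set()):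
--             if dep in file_set:
--                 la, lb = label[f], label[dep]
--                 if la != lb:
--                     for x in label:
--                         if label[x] == la:
--                             label[x] = lb
--     groups = defaultdict(list)
--     for f in files:
--         groups[label[f]].append(f)
--     return list(groups.values())
-- ===== Notes on version B (the rewrite author's own statement) =====
-- stated objective: simpler
-- what changed: Replaces union-find (parent forest with find/union and path compression) by direct label propagation: a file->label map where each merge rewrites one label into the other, so the grouping pass is a plain lookup instead of a find traversal.
import Mathlib
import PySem

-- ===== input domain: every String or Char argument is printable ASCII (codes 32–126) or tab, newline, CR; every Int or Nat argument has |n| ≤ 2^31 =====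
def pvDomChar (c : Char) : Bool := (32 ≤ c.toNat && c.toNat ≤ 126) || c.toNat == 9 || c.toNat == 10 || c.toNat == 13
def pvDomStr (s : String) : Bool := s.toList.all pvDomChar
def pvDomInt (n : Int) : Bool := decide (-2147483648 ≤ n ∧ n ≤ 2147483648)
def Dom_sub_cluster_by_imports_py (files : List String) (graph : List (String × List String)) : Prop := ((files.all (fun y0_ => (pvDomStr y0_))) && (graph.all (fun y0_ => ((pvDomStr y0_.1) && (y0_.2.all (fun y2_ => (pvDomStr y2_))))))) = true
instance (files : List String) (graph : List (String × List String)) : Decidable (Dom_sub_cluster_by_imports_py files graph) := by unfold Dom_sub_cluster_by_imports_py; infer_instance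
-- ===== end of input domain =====

-- B replaces A's union-find (parent forest, find/union with path compression) by direct
-- label propagation over a file->label dict; same return value, objective: simpler structure.


-- ===== PORT A =====
-- `while parent[x] != x: parent[x] = parent[parent[x]]; x = parent[x]` — fuel-bounded loop
-- (fuel = dict size suffices, proved below); `parent[y]` is ported as `getD y y`, exact because
-- every access A performs is at a present key (keys = set(files), values stay inside the keys).
def pvFindA : Nat → PySem.Dict String String → String → String × PySem.Dict String String
  | 0, d, x => (x, d)
  | Nat.succ n, d, x =>
    let p := d.getD x x
    if p = x then (x, d)
    else
      let g := d.getD p p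
      let d' := d.insert x g
      pvFindA n d' g

def pvUnionA (d : PySem.Dict String String) (a b : String) : PySem.Dict String String :=
  let r1 := pvFindA (PySem.Dict.size d) d a
  let r2 := pvFindA (PySem.Dict.size r1.2) r1.2 b
  if r1.1 ≠ r2.1 then r2.2.insert r1.1 r2.1 else r2.2

def sub_cluster_by_imports_py (files : List String) (graph : List (String × List String)) : List (List String) :=
  let parent0 := files.foldl (fun d f => d.insert f f) PySem.Dict.empty
  let fileSet := PySem.Set.ofList files
  let gdict := PySem.Dict.ofList graph
  let parent1 := files.foldl (fun d f =>
      (gdict.getD f []).foldl (fun d dep => if dep ∈ fileSet then pvUnionA d f dep else d) d) parent0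
  let res := files.foldl (fun (st : PySem.Dict String (List String) × PySem.Dict String String) f =>
      let fr := pvFindA (PySem.Dict.size st.2) st.2 f
      (st.1.modify fr.1 [] (· ++ [f]), fr.2)) (PySem.Dict.empty, parent1)
  res.1.values

-- ===== PORT B =====
-- `for x in label: if label[x] == la: label[x] = lb` — in-place value rewrite, order kept
def pvRelabel (m : PySem.Dict String String) (la lb : String) : PySem.Dict String String :=
  PySem.Dict.mk (m.items.map (fun p => if p.2 = la then (p.1, lb) else p))

def sub_cluster_by_imports_py_alt (files : List String) (graph : List (String × List String)) : List (List String) :=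
  let label0 := files.foldl (fun d f => d.insert f f) PySem.Dict.empty
  let fileSet := PySem.Set.ofList files
  let gdict := PySem.Dict.ofList graph
  let label := files.foldl (fun m f =>
      (gdict.getD f []).foldl (fun m dep =>
        if dep ∈ fileSet then
          let la := m.getD f f
          let lb := m.getD dep dep
          if la ≠ lb then pvRelabel m la lb else m
        else m) m) label0
  let groups := files.foldl (fun g f => g.modify (label.getD f f) [] (· ++ [f])) PySem.Dict.empty
  groups.values

-- ===== PRECONDITION & SPEC =====
def Spec_sub_cluster_by_imports_py (files : List String) (graph : List (String × List String)) (out : List (List String)) : Prop := out = sub_cluster_by_imports_py_alt files graph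
instance (files : List String) (graph : List (String × List String)) (out : List (List String)) : Decidable (Spec_sub_cluster_by_imports_py files graph out) := by unfold Spec_sub_cluster_by_imports_py; infer_instance

-- ===== CLAIM (what is proved, stated in full; the proofs are below) =====
def Claim_equal_sub_cluster_by_imports_py : Prop := ∀ (files : List String) (graph : List (String × List String)), Dom_sub_cluster_by_imports_py files graph → Spec_sub_cluster_by_imports_py files graph (sub_cluster_by_imports_py files graph)

-- ===== LEMMAS AND PROOFS =====

-- chain of parent pointers: from x, n steps of `getD · ·` reach r
def PvChain (d : PySem.Dict String String) : Nat → String → String → Prop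
  | 0, x, r => x = r
  | Nat.succ n, x, r => PvChain d n (d.getD x x) r

-- The coupling invariant between A's parent forest d and B's label map m.
def PvInv (files : List String) (d m : PySem.Dict String String) : Prop :=
  d.keys = PySem.List.dedup files ∧
  m.keys = PySem.List.dedup files ∧
  (∀ x ∈ d.keys, d.getD x x ∈ d.keys) ∧
  (∀ x : String, ∃ n : Nat, PvChain d n x (m.getD x x) ∧
      d.getD (m.getD x x) (m.getD x x) = m.getD x x ∧
      (x ∈ d.keys → n + 1 ≤ d.keys.countP (fun z => m.getD z z == m.getD x x)))

theorem pvChain_fix (d : PySem.Dict String String) (r : String)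
    (h : d.getD r r = r) : ∀ n, PvChain d n r r := by
  intro n; induction n with
  | zero => rfl
  | succ n ih => show PvChain d n (d.getD r r) r; rw [h]; exact ih

theorem pvChain_fix_unique (d : PySem.Dict String String) :
    ∀ (n : Nat) (x r : String), PvChain d n x r → d.getD x x = x → r = x := by
  intro n
  induction n with
  | zero => intro x r h _; exact h.symm
  | succ n ih =>
      intro x r h hf
      have h' : PvChain d n (d.getD x x) r := h
      rw [hf] at h'
      exact ih x r h' hf

theorem pvChain_end_mem (d : PySem.Dict String String)
    (hv : ∀ x ∈ d.keys, d.getD x x ∈ d.keys) :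
    ∀ (n : Nat) (x r : String), x ∈ d.keys → PvChain d n x r → r ∈ d.keys := by
  intro n
  induction n with
  | zero => intro x r hx h; rw [← h]; exact hx
  | succ n ih => intro x r hx h; exact ih _ r (hv x hx) h

theorem pv_getD_ne_mem (d : PySem.Dict String String) (x : String)
    (h : d.getD x x ≠ x) : x ∈ d.keys := by
  by_contra hx
  exact h (PySem.Dict.getD_of_not_contains d x
    (by rw [PySem.Dict.contains_eq_decide_mem_keys]; simp [hx]))

-- path compression rewires chains without lengthening them and keeps every root
theorem pvChain_compress (d : PySem.Dict String String) (x : String)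
    (hx : d.getD x x ≠ x) :
    ∀ (n : Nat) (y r : String), PvChain d n y r → d.getD r r = r →
      ∃ n' ≤ n, PvChain (d.insert x (d.getD (d.getD x x) (d.getD x x))) n' y r := by
  intro n
  induction n using Nat.strong_induction_on with
  | _ n ih =>
    intro y r hc hr
    match n, hc with
    | 0, hc =>
      refine ⟨0, le_refl 0, ?_⟩
      exact hc
    | Nat.succ n, hc =>
      have hc' : PvChain d n (d.getD y y) r := hc
      by_cases hyx : y = x
      · subst hyx
        match n, hc' with
        | 0, hc' =>
          -- parent of y is already the root r
          refine ⟨1, by omega, ?_⟩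
          show PvChain (d.insert y (d.getD (d.getD y y) (d.getD y y))) 0
            ((d.insert y (d.getD (d.getD y y) (d.getD y y))).getD y y) r
          rw [PySem.Dict.getD_insert]
          rw [hc', hr]
          show (if y = y then r else r) = r
          simp
        | Nat.succ m, hc' =>
          have hg : PvChain d m (d.getD (d.getD y y) (d.getD y y)) r := hc'
          obtain ⟨n', hn', hcn'⟩ := ih m (by omega) _ r hg hr
          refine ⟨n' + 1, by omega, ?_⟩
          show PvChain (d.insert y (d.getD (d.getD y y) (d.getD y y))) n'
            ((d.insert y (d.getD (d.getD y y) (d.getD y y))).getD y y) r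
          rw [PySem.Dict.getD_insert, if_pos rfl]
          exact hcn'
      · obtain ⟨n', hn', hcn'⟩ := ih n (by omega) _ r hc' hr
        refine ⟨n' + 1, by omega, ?_⟩
        show PvChain (d.insert x (d.getD (d.getD x x) (d.getD x x))) n'
          ((d.insert x (d.getD (d.getD x x) (d.getD x x))).getD y y) r
        rw [PySem.Dict.getD_insert]
        simp only [if_neg hyx]
        exact hcn'

-- inserting at a root not on the chain leaves the chain intact
theorem pvChain_avoid (d : PySem.Dict String String) (la lb : String)
    (hla : d.getD la la = la) :
    ∀ (n : Nat) (y r : String), PvChain d n y r → r ≠ la →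
      PvChain (d.insert la lb) n y r := by
  intro n
  induction n with
  | zero => intro y r h _; exact h
  | succ n ih =>
    intro y r h hne
    have h' : PvChain d n (d.getD y y) r := h
    by_cases hyla : y = la
    · subst hyla
      rw [hla] at h'
      exact absurd (pvChain_fix_unique d n y r h' hla) hne
    · have := ih _ r h' hne
      show PvChain _ n ((d.insert la lb).getD y y) r
      rw [PySem.Dict.getD_insert]
      simp only [if_neg hyla]
      exact this

-- re-pointing root la at root lb extends every chain ending at la by one step to lb
theorem pvChain_merge (d : PySem.Dict String String) (la lb : String)
    (hlb : d.getD lb lb = lb) (hne : la ≠ lb) :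
    ∀ (n : Nat) (y : String), PvChain d n y la →
      PvChain (d.insert la lb) (n + 1) y lb := by
  have hfixlb : (d.insert la lb).getD lb lb = lb := by
    rw [PySem.Dict.getD_insert]; simp only [if_neg (Ne.symm hne)]; exact hlb
  intro n
  induction n with
  | zero =>
    intro y h
    have hy : y = la := h
    subst hy
    show PvChain (d.insert y lb) 0 ((d.insert y lb).getD y y) lb
    rw [PySem.Dict.getD_insert, if_pos rfl]
    rfl
  | succ n ih =>
    intro y h
    have h' : PvChain d n (d.getD y y) la := h
    by_cases hyla : y = la
    · subst hyla
      show PvChain (d.insert y lb) (n + 1) ((d.insert y lb).getD y y) lb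
      rw [PySem.Dict.getD_insert, if_pos rfl]
      exact pvChain_fix _ lb hfixlb (n + 1)
    · have := ih _ h'
      show PvChain (d.insert la lb) (n + 1) ((d.insert la lb).getD y y) lb
      rw [PySem.Dict.getD_insert]
      simp only [if_neg hyla]
      exact this

theorem pvInv_compress (files : List String) (d m : PySem.Dict String String)
    (h : PvInv files d m) (x : String) (hx : d.getD x x ≠ x) :
    PvInv files (d.insert x (d.getD (d.getD x x) (d.getD x x))) m := by
  obtain ⟨hk, hmk, hv, hr⟩ := h
  have hxk : x ∈ d.keys := pv_getD_ne_mem d x hx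
  have hcont : d.contains x = true := (PySem.Dict.contains_iff_mem_keys d x).mpr hxk
  have hkeys : (d.insert x (d.getD (d.getD x x) (d.getD x x))).keys = d.keys :=
    PySem.Dict.keys_insert_of_contains d _ hcont
  refine ⟨by rw [hkeys]; exact hk, hmk, ?_, ?_⟩
  · intro y hy
    rw [hkeys] at hy ⊢
    rw [PySem.Dict.getD_insert]
    by_cases hyx : y = x
    · simp only [if_pos hyx]
      exact hv _ (hv _ hxk)
    · simp only [if_neg hyx]
      exact hv _ hy
  · intro y
    obtain ⟨n, hc, hfix, hb⟩ := hr y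
    have hrx : m.getD y y ≠ x := fun he => hx (he ▸ hfix)
    obtain ⟨n', hn', hc'⟩ := pvChain_compress d x hx n y _ hc hfix
    refine ⟨n', hc', ?_, ?_⟩
    · rw [PySem.Dict.getD_insert]
      simp only [if_neg hrx]
      exact hfix
    · intro hy
      rw [hkeys] at hy ⊢
      exact le_trans (by omega) (hb hy)

theorem pvFindA_spec (files : List String) (m : PySem.Dict String String) :
    ∀ (n : Nat) (d : PySem.Dict String String) (fuel : Nat) (x r : String),
      PvInv files d m → PvChain d n x r → d.getD r r = r → n ≤ fuel →
      ∃ d', pvFindA fuel d x = (r, d') ∧ PvInv files d' m := by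
  intro n
  induction n using Nat.strong_induction_on with
  | _ n ih =>
    intro d fuel x r hinv hc hr hfuel
    match fuel with
    | 0 =>
      match n, hc with
      | 0, hc => exact ⟨d, by rw [pvFindA]; rw [hc], hinv⟩
    | Nat.succ fuel =>
      by_cases hfx : d.getD x x = x
      · have hrx : r = x := by
          match n, hc with
          | 0, hc => exact hc.symm
          | Nat.succ k, hc =>
            have hc' : PvChain d k (d.getD x x) r := hc
            rw [hfx] at hc'
            exact pvChain_fix_unique d k x r hc' hfx
        refine ⟨d, ?_, hinv⟩
        rw [pvFindA]
        simp only [if_pos hfx]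
        rw [hrx]
      · have hinv' := pvInv_compress files d m hinv x hfx
        have hrnex : r ≠ x := fun he => hfx (he ▸ hr)
        -- chain from the grandparent g in the compressed dict
        have hstep : ∃ k ≤ fuel, k < n ∧
            PvChain (d.insert x (d.getD (d.getD x x) (d.getD x x))) k
              (d.getD (d.getD x x) (d.getD x x)) r := by
          match n, hc with
          | 0, hc => exact absurd (hc ▸ hr) hfx
          | Nat.succ n, hc =>
            have hc1 : PvChain d n (d.getD x x) r := hc
            match n, hc1, hfuel with
            | 0, hc1, hfuel =>
              -- parent is the root; grandparent = root as well
              have hg : d.getD (d.getD x x) (d.getD x x) = r := by rw [hc1, hr]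
              exact ⟨0, by omega, by omega, hg⟩
            | Nat.succ n, hc1, hfuel =>
              have hc2 : PvChain d n (d.getD (d.getD x x) (d.getD x x)) r := hc1
              obtain ⟨k, hk, hck⟩ := pvChain_compress d x hfx n _ r hc2 hr
              exact ⟨k, by omega, by omega, hck⟩
        obtain ⟨k, hkf, hkn, hck⟩ := hstep
        have hr' : (d.insert x (d.getD (d.getD x x) (d.getD x x))).getD r r = r := by
          rw [PySem.Dict.getD_insert]
          simp only [if_neg hrnex]
          exact hr
        obtain ⟨d', hfind, hinv''⟩ := ih k hkn _ fuel _ r hinv' hck hr' hkf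
        refine ⟨d', ?_, hinv''⟩
        rw [pvFindA]
        simp only [if_neg hfx]
        exact hfind

theorem pvFindA_root (files : List String) (d m : PySem.Dict String String)
    (h : PvInv files d m) (x : String) (hx : x ∈ PySem.List.dedup files) :
    ∃ d', pvFindA (PySem.Dict.size d) d x = (m.getD x x, d') ∧ PvInv files d' m := by
  obtain ⟨n, hc, hfix, hb⟩ := h.2.2.2 x
  have hxk : x ∈ d.keys := by rw [h.1]; exact hx
  have hsize : d.keys.length ≤ PySem.Dict.size d := by
    simp [PySem.Dict.size, PySem.Dict.keys, List.length_map]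
  have hn : n ≤ PySem.Dict.size d :=
    le_trans (by have := hb hxk; have h2 := List.countP_le_length (p := fun z => m.getD z z == m.getD x x) (l := d.keys); omega) hsize
  exact pvFindA_spec files m n d (PySem.Dict.size d) x _ h hc hfix hn

theorem pvRelabel_keys (m : PySem.Dict String String) (la lb : String) :
    (pvRelabel m la lb).keys = m.keys := by
  show (m.items.map _).map _ = _
  rw [List.map_map]
  exact List.map_congr_left (fun p _ => by by_cases h : p.2 = la <;> simp [h])

theorem pvRelabel_get? (la lb y : String) :
    ∀ (l : List (String × String)),
      (PySem.Dict.mk (l.map (fun p => if p.2 = la then (p.1, lb) else p))).get? y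
        = ((PySem.Dict.mk l).get? y).map (fun v => if v = la then lb else v) := by
  intro l
  induction l with
  | nil => rfl
  | cons p rest ih =>
    obtain ⟨k, v⟩ := p
    have hhead : (if (k, v).2 = la then ((k, v).1, lb) else (k, v))
        = (k, if v = la then lb else v) := by
      by_cases hv : v = la <;> simp [hv]
    rw [List.map_cons, hhead, PySem.Dict.get?_mk_cons, PySem.Dict.get?_mk_cons]
    by_cases hk : (k == y) = true
    · simp [hk]
    · simp only [hk, Bool.false_eq_true, if_neg, not_false_iff]
      exact ih

theorem pvRelabel_getD (m : PySem.Dict String String) (la lb y : String)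
    (hla : la ∈ m.keys) :
    (pvRelabel m la lb).getD y y = if m.getD y y = la then lb else m.getD y y := by
  obtain ⟨l⟩ := m
  rw [PySem.Dict.getD_eq_get?_getD, PySem.Dict.getD_eq_get?_getD]
  rw [show (pvRelabel (PySem.Dict.mk l) la lb) = PySem.Dict.mk
        (l.map (fun p => if p.2 = la then (p.1, lb) else p)) from rfl]
  rw [pvRelabel_get? la lb y l]
  match hget : (PySem.Dict.mk l).get? y with
  | some v => simp
  | none =>
    simp only [Option.map_none, Option.getD_none]
    have hy : y ∉ (PySem.Dict.mk l).keys := by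
      rw [← PySem.Dict.get?_eq_none_iff_not_mem_keys]; exact hget
    have : y ≠ la := fun he => hy (he ▸ hla)
    simp [this]

-- every chain endpoint named by m is itself m-fixed and lies in the keys
theorem pvRoot_self (files : List String) (d m : PySem.Dict String String)
    (h : PvInv files d m) (x : String) :
    m.getD (m.getD x x) (m.getD x x) = m.getD x x := by
  obtain ⟨n, hc, hfix, -⟩ := h.2.2.2 (m.getD x x)
  exact pvChain_fix_unique d n _ _ hc (h.2.2.2 x).choose_spec.2.1

theorem pvRoot_mem (files : List String) (d m : PySem.Dict String String)
    (h : PvInv files d m) (x : String) (hx : x ∈ d.keys) :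
    m.getD x x ∈ d.keys := by
  obtain ⟨n, hc, hfix, -⟩ := h.2.2.2 x
  exact pvChain_end_mem d h.2.2.1 n x _ hx hc

theorem pv_countP_or (p q : String → Bool) (hdisj : ∀ a, ¬(p a = true ∧ q a = true)) :
    ∀ l : List String, l.countP (fun a => p a || q a) = l.countP p + l.countP q := by
  intro l
  induction l with
  | nil => simp
  | cons a l ih =>
    by_cases hp : p a = true
    · have hq : q a = false := by
        cases hq : q a
        · rfl
        · exact absurd ⟨hp, hq⟩ (hdisj a)
      simp [hp, hq, ih]
      omega
    · cases hq : q a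
      · simp [hp, hq, ih, Bool.false_eq_true]
      · simp [hp, hq, ih, Bool.false_eq_true]
        omega

theorem pvInv_union (files : List String) (d m : PySem.Dict String String)
    (f dep : String) (hf : f ∈ PySem.List.dedup files) (hdep : dep ∈ PySem.List.dedup files)
    (h : PvInv files d m) :
    PvInv files (pvUnionA d f dep)
      (if m.getD f f ≠ m.getD dep dep then pvRelabel m (m.getD f f) (m.getD dep dep) else m) := by
  obtain ⟨d1, hf1, hinv1⟩ := pvFindA_root files d m h f hf
  obtain ⟨d2, hf2, hinv2⟩ := pvFindA_root files d1 m hinv1 dep hdep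
  have hU : pvUnionA d f dep =
      (if m.getD f f ≠ m.getD dep dep then d2.insert (m.getD f f) (m.getD dep dep) else d2) := by
    simp only [pvUnionA, hf1, hf2]
  rw [hU]
  by_cases hne : m.getD f f ≠ m.getD dep dep
  · simp only [if_pos hne]
    set la := m.getD f f with hla
    set lb := m.getD dep dep with hlb
    obtain ⟨hk2, hmk2, hv2, hr2⟩ := hinv2
    have hfixla : d2.getD la la = la := (hr2 f).choose_spec.2.1
    have hfixlb : d2.getD lb lb = lb := (hr2 dep).choose_spec.2.1
    have hfk : f ∈ d2.keys := by rw [hk2]; exact hf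
    have hdk : dep ∈ d2.keys := by rw [hk2]; exact hdep
    have hlak : la ∈ d2.keys := pvRoot_mem files d2 m ⟨hk2, hmk2, hv2, hr2⟩ f hfk
    have hlbk : lb ∈ d2.keys := pvRoot_mem files d2 m ⟨hk2, hmk2, hv2, hr2⟩ dep hdk
    have hmla : m.getD la la = la := pvRoot_self files d2 m ⟨hk2, hmk2, hv2, hr2⟩ f
    have hmlb : m.getD lb lb = lb := pvRoot_self files d2 m ⟨hk2, hmk2, hv2, hr2⟩ dep
    have hlamk : la ∈ m.keys := by rw [hmk2, ← hk2]; exact hlak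
    have hkeys3 : (d2.insert la lb).keys = d2.keys :=
      PySem.Dict.keys_insert_of_contains d2 _ ((PySem.Dict.contains_iff_mem_keys d2 la).mpr hlak)
    have hget' : ∀ y, (pvRelabel m la lb).getD y y = if m.getD y y = la then lb else m.getD y y :=
      fun y => pvRelabel_getD m la lb y hlamk
    refine ⟨by rw [hkeys3]; exact hk2, by rw [pvRelabel_keys]; exact hmk2, ?_, ?_⟩
    · intro y hy
      rw [hkeys3] at hy ⊢
      rw [PySem.Dict.getD_insert]
      by_cases hyla : y = la
      · simp only [if_pos hyla]; exact hlbk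
      · simp only [if_neg hyla]; exact hv2 y hy
    · intro y
      obtain ⟨n, hc, hfix, hb⟩ := hr2 y
      by_cases hrla : m.getD y y = la
      · -- y's component is merged into lb's
        refine ⟨n + 1, ?_, ?_, ?_⟩
        · rw [hget' y, if_pos hrla]
          exact pvChain_merge d2 la lb hfixlb hne n y (hrla ▸ hc)
        · rw [hget' y, if_pos hrla]
          rw [PySem.Dict.getD_insert]
          simp only [if_neg (Ne.symm hne)]
          exact hfixlb
        · intro hy
          rw [hget' y, if_pos hrla, hkeys3]
          have hcongr : (d2.keys.countP (fun z => (pvRelabel m la lb).getD z z == lb))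
              = d2.keys.countP (fun z => (m.getD z z == la) || (m.getD z z == lb)) := by
            refine List.countP_congr (fun z _ => ?_)
            rw [hget' z]
            by_cases hz : m.getD z z = la
            · simp [hz]
            · simp [hz]
          rw [hcongr, pv_countP_or _ _ (fun a ha => hne (by
              obtain ⟨h1, h2⟩ := ha
              rw [beq_iff_eq] at h1 h2
              exact h1.symm.trans h2))]
          have h1 : n + 1 ≤ d2.keys.countP (fun z => m.getD z z == la) := by
            have hy2 : y ∈ d2.keys := by rw [hkeys3] at hy; exact hy
            have := hb hy2
            rwa [hrla] at this
          have h2 : 0 < d2.keys.countP (fun z => m.getD z z == lb) :=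
            by
            rw [List.countP_pos_iff]
            exact ⟨lb, hlbk, by simp [hmlb]⟩
          omega
      · -- y's component is untouched
        refine ⟨n, ?_, ?_, ?_⟩
        · rw [hget' y, if_neg hrla]
          exact pvChain_avoid d2 la lb hfixla n y _ hc hrla
        · rw [hget' y, if_neg hrla]
          rw [PySem.Dict.getD_insert]
          simp only [if_neg hrla]
          exact hfix
        · intro hy
          rw [hget' y, if_neg hrla, hkeys3]
          rw [hkeys3] at hy
          refine le_trans (hb hy) (List.countP_mono_left (fun z _ hz => ?_))
          rw [hget' z]
          rw [beq_iff_eq] at hz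
          rw [hz]
          simp [hrla]
  · simp only [if_neg hne]
    exact hinv2

theorem pvInner_pair (files : List String) (f : String) (hf : f ∈ PySem.List.dedup files) :
    ∀ (deps : List String) (d m : PySem.Dict String String), PvInv files d m →
      PvInv files
        (deps.foldl (fun d dep => if dep ∈ PySem.Set.ofList files then pvUnionA d f dep else d) d)
        (deps.foldl (fun m dep =>
          if dep ∈ PySem.Set.ofList files then
            let la := m.getD f f
            let lb := m.getD dep dep
            if la ≠ lb then pvRelabel m la lb else m
          else m) m) := by
  intro deps
  induction deps with
  | nil => intro d m h; exact h
  | cons dep deps ih =>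
    intro d m h
    simp only [List.foldl_cons]
    by_cases hmem : dep ∈ PySem.Set.ofList files
    · simp only [if_pos hmem]
      have hdep : dep ∈ PySem.List.dedup files := by
        rw [PySem.List.mem_dedup]
        exact (PySem.Set.mem_ofList files dep).mp hmem
      exact ih _ _ (pvInv_union files d m f dep hf hdep h)
    · simp only [if_neg hmem]
      exact ih _ _ h

theorem pvOuter_pair (files : List String) (gdict : PySem.Dict String (List String)) :
    ∀ (fs : List String) (d m : PySem.Dict String String),
      (∀ f ∈ fs, f ∈ PySem.List.dedup files) → PvInv files d m →
      PvInv files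
        (fs.foldl (fun d f =>
          (gdict.getD f []).foldl (fun d dep =>
            if dep ∈ PySem.Set.ofList files then pvUnionA d f dep else d) d) d)
        (fs.foldl (fun m f =>
          (gdict.getD f []).foldl (fun m dep =>
            if dep ∈ PySem.Set.ofList files then
              let la := m.getD f f
              let lb := m.getD dep dep
              if la ≠ lb then pvRelabel m la lb else m
            else m) m) m) := by
  intro fs
  induction fs with
  | nil => intro d m _ h; exact h
  | cons f fs ih =>
    intro d m hmem h
    simp only [List.foldl_cons]
    exact ih _ _ (fun g hg => hmem g (List.mem_cons_of_mem f hg))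
      (pvInner_pair files f (hmem f (List.mem_cons_self)) _ d m h)

theorem pvGroup_pair (files : List String) (m : PySem.Dict String String) :
    ∀ (fs : List String) (g : PySem.Dict String (List String)) (d : PySem.Dict String String),
      (∀ f ∈ fs, f ∈ PySem.List.dedup files) → PvInv files d m →
      (fs.foldl (fun (st : PySem.Dict String (List String) × PySem.Dict String String) f =>
          let fr := pvFindA (PySem.Dict.size st.2) st.2 f
          (st.1.modify fr.1 [] (· ++ [f]), fr.2)) (g, d)).1
        = fs.foldl (fun g f => g.modify (m.getD f f) [] (· ++ [f])) g := by
  intro fs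
  induction fs with
  | nil => intro g d _ _; rfl
  | cons f fs ih =>
    intro g d hmem h
    obtain ⟨d', hfind, hinv'⟩ := pvFindA_root files d m h f (hmem f (List.mem_cons_self))
    simp only [List.foldl_cons, hfind]
    exact ih _ d' (fun x hx => hmem x (List.mem_cons_of_mem f hx)) hinv'

theorem pvInv_init (files : List String) :
    PvInv files (files.foldl (fun d f => d.insert f f) PySem.Dict.empty)
                (files.foldl (fun d f => d.insert f f) PySem.Dict.empty) := by
  have hid : ∀ (l : List String) (d : PySem.Dict String String),
      (∀ x, d.getD x x = x) → ∀ x, (l.foldl (fun d f => d.insert f f) d).getD x x = x := by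
    intro l
    induction l with
    | nil => intro d hd x; exact hd x
    | cons f l ih =>
      intro d hd x
      refine ih _ (fun y => ?_) x
      rw [PySem.Dict.getD_insert]
      by_cases hy : y = f
      · simp [hy]
      · simp only [if_neg hy]; exact hd y
  have hgd : ∀ x, (files.foldl (fun d f => d.insert f f) PySem.Dict.empty).getD x x = x :=
    hid files PySem.Dict.empty (fun x => by rw [PySem.Dict.getD_empty])
  have hkeys : (files.foldl (fun d f => d.insert f f) PySem.Dict.empty).keys
      = PySem.List.dedup files := by
    have := PySem.Dict.keys_foldl_insert (ν := String) files (fun _ x => x) PySem.Dict.empty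
    rw [this, PySem.List.dedup_eq_ofList]
    simp [pysem]
  refine ⟨hkeys, hkeys, fun x hx => by rw [hgd x]; exact hx, fun x => ?_⟩
  refine ⟨0, by rw [hgd x]; rfl, by rw [hgd x, hgd x], fun hx => ?_⟩
  have : 0 < List.countP (fun z =>
      (files.foldl (fun d f => d.insert f f) PySem.Dict.empty).getD z z ==
      (files.foldl (fun d f => d.insert f f) PySem.Dict.empty).getD x x)
      (files.foldl (fun d f => d.insert f f) PySem.Dict.empty).keys := by
    rw [List.countP_pos_iff]
    exact ⟨x, hx, by simp⟩
  omega

-- ===== VERDICT (by name: the statement is the Claim_ definition above) =====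
theorem sub_cluster_by_imports_py_spec : Claim_equal_sub_cluster_by_imports_py := by
  intro files graph _
  show sub_cluster_by_imports_py files graph = sub_cluster_by_imports_py_alt files graph
  unfold sub_cluster_by_imports_py sub_cluster_by_imports_py_alt
  simp only []
  have h0 := pvInv_init files
  have h1 := pvOuter_pair files (PySem.Dict.ofList graph) files _ _
    (fun f hf => (PySem.List.mem_dedup files f).mpr hf) h0
  rw [pvGroup_pair files _ files PySem.Dict.empty _
    (fun f hf => (PySem.List.mem_dedup files f).mpr hf) h1]
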